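-- pv_equiv track=rewrite | github.com/raatiniemi/advent-of-code | python/src/twentyfifteen/day_14.py | _calculate_reindeer_points_after_seconds
-- ===== SOURCE A (Python) =====
-- def _calculate_reindeer_distance_after_seconds(seconds: int, data: [str]) -> {str, int}:
--     reindeer_distance: {str, int} = {}
--     for reindeer in [x.split(' ') for x in data]:
--         name = reindeer[0]
--         speed = int(reindeer[3])
--         duration = int(reindeer[6])
--         rest = int(reindeer[13])
--
--         repeats, r = divmod(seconds, duration + rest)
--         reindeer_distance[name] = speed * (repeats * duration + min(r, duration))
--
--     return reindeer_distance
--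
-- def _calculate_reindeer_points_after_seconds(seconds: int, data: [str]) -> {str, int}:
--     scores = dict([(line.split(' ')[0], 0) for line in data])
--     for time in range(seconds):
--         current_distances = _calculate_reindeer_distance_after_seconds(time + 1, data)
--         furthest_distance = max(current_distances.values())
--         for reindeer in current_distances:
--             current_distance = current_distances[reindeer]
--             scores[reindeer] += furthest_distance == current_distance
--
--     return scores
-- ===== SOURCE B (Python) =====
-- def _parse(line):
--     parts = line.split(' ')
--     return parts[0], int(parts[3]), int(parts[6]), int(parts[13])
--
--
-- def _advance(t, records, distances):
--     for name, speed, duration, rest in records: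
--         if (t - 1) % (duration + rest) < duration:
--             distances[name] += speed
--     return distances
--
--
-- def _calculate_reindeer_points_after_seconds(seconds: int, data: [str]) -> {str, int}:
--     names = [line.split(' ')[0] for line in data]
--     scores = {name: 0 for name in names}
--     if seconds <= 0:
--         return scores
--     records = [_parse(line) for line in data]
--     distances = {name: 0 for name in names}
--     for t in range(1, seconds + 1):
--         distances = _advance(t, records, distances)
--         lead = max(distances.values())
--         for name in names:
--             if distances[name] == lead:
--                 scores[name] += 1
--     return scores
-- ===== Notes on version B (the rewrite author's own statement) =====
-- stated objective: alternative
-- what changed: B parses each line once into (name,speed,duration,rest) records and maintains each reindeer's cumulative distance incrementally (add speed when the second falls in the flying phase of the cycle), instead of A's re-splitting every line and recomputing every distance from scratch with divmod on each of the `seconds` iterations.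
import Mathlib
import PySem

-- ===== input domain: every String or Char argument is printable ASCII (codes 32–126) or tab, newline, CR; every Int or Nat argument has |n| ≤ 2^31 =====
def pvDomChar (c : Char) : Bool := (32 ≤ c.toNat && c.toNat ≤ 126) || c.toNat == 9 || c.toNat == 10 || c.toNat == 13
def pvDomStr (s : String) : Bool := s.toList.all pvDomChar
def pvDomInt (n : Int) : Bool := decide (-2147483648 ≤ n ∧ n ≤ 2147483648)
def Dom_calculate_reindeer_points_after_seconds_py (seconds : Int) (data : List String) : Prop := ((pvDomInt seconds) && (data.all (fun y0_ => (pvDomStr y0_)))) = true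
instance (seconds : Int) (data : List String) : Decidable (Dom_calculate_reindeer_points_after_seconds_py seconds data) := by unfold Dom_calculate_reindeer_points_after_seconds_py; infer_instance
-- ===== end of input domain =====

-- B parses each line once into (name, speed, duration, rest) records and updates each
-- reindeer's cumulative distance incrementally each second, instead of A's re-splitting
-- every line and recomputing every distance from scratch with divmod on every second.


-- ===== PORT A =====
def pvDistA (seconds : Int) (data : List String) : PySem.Dict String Int :=
  (data.map (fun x => (PySem.Str.split? x " ").getD [])).foldl (fun d reindeer =>
    let name := (PySem.List.pyGet? reindeer 0).getD ""
    let speed := (PySem.Int.ofStr? ((PySem.List.pyGet? reindeer 3).getD "")).getD 0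
    let duration := (PySem.Int.ofStr? ((PySem.List.pyGet? reindeer 6).getD "")).getD 0
    let rest := (PySem.Int.ofStr? ((PySem.List.pyGet? reindeer 13).getD "")).getD 0
    let rr := (PySem.Int.divmod? seconds (duration + rest)).getD (0, 0)
    d.insert name (speed * (rr.1 * duration + min rr.2 duration))) PySem.Dict.empty

def calculate_reindeer_points_after_seconds_py (seconds : Int) (data : List String) : List (String × Int) :=
  let scores0 : PySem.Dict String Int :=
    PySem.Dict.ofList (data.map (fun line =>
      ((PySem.List.pyGet? ((PySem.Str.split? line " ").getD []) 0).getD "", (0 : Int))))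
  ((PySem.List.pyRange 0 seconds 1).foldl (fun scores _time =>
    let cd := pvDistA (_time + 1) data
    let furthest := (PySem.List.max? cd.values (fun v => v)).getD 0
    cd.keys.foldl (fun sc reindeer =>
      let current := (cd.get? reindeer).getD 0
      sc.insert reindeer (sc.getD reindeer 0 + (if furthest == current then 1 else 0))) scores) scores0).items

-- ===== PORT B =====
def pvParseB (line : String) : String × Int × Int × Int :=
  let parts := (PySem.Str.split? line " ").getD []
  ((PySem.List.pyGet? parts 0).getD "",
   (PySem.Int.ofStr? ((PySem.List.pyGet? parts 3).getD "")).getD 0,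
   (PySem.Int.ofStr? ((PySem.List.pyGet? parts 6).getD "")).getD 0,
   (PySem.Int.ofStr? ((PySem.List.pyGet? parts 13).getD "")).getD 0)

def pvAdvanceB (t : Int) (records : List (String × Int × Int × Int))
    (distances : PySem.Dict String Int) : PySem.Dict String Int :=
  records.foldl (fun d rec =>
    if PySem.Int.mod (t - 1) (rec.2.2.1 + rec.2.2.2) < rec.2.2.1
    then d.insert rec.1 (d.getD rec.1 0 + rec.2.1) else d) distances

def calculate_reindeer_points_after_seconds_py_alt (seconds : Int) (data : List String) : List (String × Int) :=
  let names := data.map (fun line => (PySem.List.pyGet? ((PySem.Str.split? line " ").getD []) 0).getD "")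
  let scores0 : PySem.Dict String Int := names.foldl (fun d n => d.insert n 0) PySem.Dict.empty
  if seconds ≤ 0 then scores0.items
  else
    let records := data.map pvParseB
    let dist0 : PySem.Dict String Int := names.foldl (fun d n => d.insert n 0) PySem.Dict.empty
    (((PySem.List.pyRange 1 (seconds + 1) 1).foldl
      (fun (st : PySem.Dict String Int × PySem.Dict String Int) t =>
        let dist := pvAdvanceB t records st.2
        let lead := (PySem.List.max? dist.values (fun v => v)).getD 0
        let scores := names.foldl (fun sc n =>
          if dist.getD n 0 == lead then sc.insert n (sc.getD n 0 + 1) else sc) st.1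
        (scores, dist)) (scores0, dist0)).1).items

-- ===== PRECONDITION & SPEC =====
-- helpers for the precondition: the fields of one data line
def pvFields (line : String) : List String := (PySem.Str.split? line " ").getD []
def pvName (line : String) : String := (PySem.List.pyGet? (pvFields line) 0).getD ""
def pvField? (line : String) (i : Int) : Option Int :=
  (PySem.List.pyGet? (pvFields line) i).bind PySem.Int.ofStr?
-- a well-formed line: fields 3/6/13 are ints, duration/rest nonnegative, cycle positive
def pvLineOK (line : String) : Prop :=
  (pvField? line 3).isSome = true ∧ (pvField? line 6).isSome = true ∧
  (pvField? line 13).isSome = true ∧ 0 ≤ (pvField? line 6).getD 0 ∧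
  0 ≤ (pvField? line 13).getD 0 ∧ 1 ≤ (pvField? line 6).getD 0 + (pvField? line 13).getD 0

-- For seconds ≥ 1, Pre_ excludes inputs on which A raises (empty data: max() of an empty
-- sequence; lines without int fields at positions 3/6/13: IndexError/ValueError;
-- duration+rest = 0: ZeroDivisionError), and two corners on which A still returns:
-- duplicate reindeer names, where A's dict overwrite silently drops all but the last
-- record of a name, and negative duration/rest values, which lie outside the puzzle's
-- natural domain (a reindeer cannot fly or rest for a negative time).
def Pre_calculate_reindeer_points_after_seconds_py (seconds : Int) (data : List String) : Prop :=
  seconds ≤ 0 ∨ (data ≠ [] ∧ (data.map pvName).Nodup ∧ ∀ line ∈ data, pvLineOK line)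

instance (seconds : Int) (data : List String) : Decidable (Pre_calculate_reindeer_points_after_seconds_py seconds data) := by
  unfold Pre_calculate_reindeer_points_after_seconds_py pvLineOK; infer_instance

def pvWitness_calculate_reindeer_points_after_seconds_py : Int × List String :=
  (2, ["C can fly 2 km/s for 3 seconds, but then must rest for 1 seconds.",
       "D can fly 5 km/s for 1 seconds, but then must rest for 2 seconds."])

def Spec_calculate_reindeer_points_after_seconds_py (seconds : Int) (data : List String) (out : List (String × Int)) : Prop := out = calculate_reindeer_points_after_seconds_py_alt seconds data
instance (seconds : Int) (data : List String) (out : List (String × Int)) : Decidable (Spec_calculate_reindeer_points_after_seconds_py seconds data out) := by unfold Spec_calculate_reindeer_points_after_seconds_py; infer_instance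

-- ===== CLAIM (what is proved, stated in full; the proofs are below) =====
def Claim_equal_calculate_reindeer_points_after_seconds_py : Prop := ∀ (seconds : Int) (data : List String), Dom_calculate_reindeer_points_after_seconds_py seconds data → Pre_calculate_reindeer_points_after_seconds_py seconds data → Spec_calculate_reindeer_points_after_seconds_py seconds data (calculate_reindeer_points_after_seconds_py seconds data)

-- ===== LEMMAS AND PROOFS =====

-- the parsed record fields of a line, and the closed-form distance after t seconds
def pvSp (line : String) : Int := (pvField? line 3).getD 0
def pvDu (line : String) : Int := (pvField? line 6).getD 0
def pvRe (line : String) : Int := (pvField? line 13).getD 0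
def pvClosed (t : Int) (line : String) : Int :=
  let rr := (PySem.Int.divmod? t (pvDu line + pvRe line)).getD (0, 0)
  pvSp line * (rr.1 * pvDu line + min rr.2 (pvDu line))

-- the leading distance after t seconds, and the running score table
def pvF (data : List String) (t : Int) : Int :=
  (PySem.List.max? (data.map (fun l => pvClosed t l)) (fun v => v)).getD 0
def pvW (data : List String) : Nat → String → Int
  | 0, _ => 0
  | n+1, l =>
      pvW data n l + (if pvF data ((n : Int) + 1) = pvClosed ((n : Int) + 1) l then 1 else 0)

lemma pvGetter (l : List String) (i : Int) :
    (PySem.Int.ofStr? ((PySem.List.pyGet? l i).getD "")).getD 0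
      = ((PySem.List.pyGet? l i).bind PySem.Int.ofStr?).getD 0 := by
  cases h : PySem.List.pyGet? l i
  · simp [h, show PySem.Int.ofStr? "" = none from rfl]
  · simp [h]

lemma pvDivmod (a b : Int) (hb : b ≠ 0) :
    PySem.Int.divmod? a b = some (PySem.Int.floordiv a b, PySem.Int.mod a b) := by
  simp [PySem.Int.divmod?, hb]
  exact ⟨rfl, rfl⟩

lemma pvLineOK_facts (line : String) (h : pvLineOK line) :
    0 ≤ pvDu line ∧ 0 ≤ pvRe line ∧ 1 ≤ pvDu line + pvRe line := by
  obtain ⟨-, -, -, h4, h5, h6⟩ := h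
  exact ⟨h4, h5, h6⟩

theorem pvstep_core (d r s t : Int) (hd : 0 ≤ d) (hr : 0 ≤ r) (hc : 1 ≤ d + r) (ht : 0 ≤ t) :
    s * (((t+1) / (d+r)) * d + min ((t+1) % (d+r)) d)
      = s * ((t / (d+r)) * d + min (t % (d+r)) d) + (if t % (d+r) < d then s else 0) := by
  set c := d + r with hcdef
  have hcpos : 0 < c := by omega
  have hm0 : 0 ≤ t % c := Int.emod_nonneg t (by omega)
  have hm1 : t % c < c := Int.emod_lt_of_pos t hcpos
  set q := t / c with hq
  set m := t % c with hm
  have hsplit : q * c + m = t := by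
    have h := Int.ediv_add_emod t c
    rw [mul_comm] at h; exact h
  by_cases hcase : m + 1 < c
  · have ht1 : t + 1 = (m + 1) + q * c := by omega
    have hdiv : (t + 1) / c = q := by
      rw [ht1, Int.add_mul_ediv_right _ _ (by omega : c ≠ 0),
        Int.ediv_eq_zero_of_lt (by omega) hcase]
      ring
    have hmod : (t + 1) % c = m + 1 := by
      rw [ht1, mul_comm q c, Int.add_mul_emod_self_left, Int.emod_eq_of_lt (by omega) hcase]
    rw [hdiv, hmod]
    by_cases h : d ≤ m
    · rw [min_eq_right (by omega), min_eq_right (by omega), if_neg (by omega)]; ring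
    · rw [min_eq_left (by omega), min_eq_left (by omega), if_pos (by omega)]; ring
  · have hmc : m + 1 = c := by omega
    have hexp : (q + 1) * c = q * c + c := by ring
    have ht1 : t + 1 = (q + 1) * c := by omega
    have hdiv : (t + 1) / c = q + 1 := by rw [ht1, Int.mul_ediv_cancel _ (by omega : c ≠ 0)]
    have hmod : (t + 1) % c = 0 := by rw [ht1, Int.mul_emod_left]
    rw [hdiv, hmod]
    by_cases h : d ≤ m
    · rw [min_eq_left hd, min_eq_right (by omega), if_neg (by omega)]; ring
    · have hr0 : r = 0 := by omega
      have hmd : m = d - 1 := by omega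
      rw [min_eq_left hd, min_eq_left (by omega), if_pos (by omega), hmd]
      ring

lemma pvClosed_zero (line : String) (h : pvLineOK line) : pvClosed 0 line = 0 := by
  obtain ⟨hd, hr, hc⟩ := pvLineOK_facts line h
  have hcpos : (0 : Int) < pvDu line + pvRe line := by omega
  unfold pvClosed
  rw [pvDivmod _ _ (by omega)]
  simp [PySem.Int.floordiv_eq_ediv_of_pos hcpos, PySem.Int.mod_eq_emod_of_pos hcpos,
    Int.zero_ediv, Int.zero_emod, min_eq_left hd]

lemma pvClosed_succ (line : String) (h : pvLineOK line) (t : Int) (ht : 0 ≤ t) :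
    pvClosed (t + 1) line
      = pvClosed t line
          + (if PySem.Int.mod t (pvDu line + pvRe line) < pvDu line then pvSp line else 0) := by
  obtain ⟨hd, hr, hc⟩ := pvLineOK_facts line h
  have hcpos : (0 : Int) < pvDu line + pvRe line := by omega
  unfold pvClosed
  rw [pvDivmod _ _ (by omega), pvDivmod _ _ (by omega)]
  simp only [Option.getD_some]
  rw [PySem.Int.floordiv_eq_ediv_of_pos hcpos, PySem.Int.mod_eq_emod_of_pos hcpos,
    PySem.Int.floordiv_eq_ediv_of_pos hcpos, PySem.Int.mod_eq_emod_of_pos hcpos]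
  exact pvstep_core (pvDu line) (pvRe line) (pvSp line) t hd hr hc ht

-- folding an overwrite/skip update along distinct keys rewrites the items pointwise
lemma pvFoldUpdate {α : Type} (key : α → String) (v : α → Int) (c : α → Prop)
    [DecidablePred c] (g : α → Int → Int) :
    ∀ (xs : List α) (l₀ : List (String × Int)) (d : PySem.Dict String Int),
      d.items = l₀ ++ xs.map (fun a => (key a, v a)) →
      (l₀.map Prod.fst ++ xs.map key).Nodup →
      (xs.foldl (fun sc a => if c a then sc.insert (key a) (g a (sc.getD (key a) 0)) else sc) d).items
        = l₀ ++ xs.map (fun a => (key a, if c a then g a (v a) else v a))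
  | [], l₀, d, hitems, _ => by simpa using hitems
  | x :: xs, l₀, d, hitems, hnd => by
    have hkeys : d.keys = l₀.map Prod.fst ++ key x :: xs.map key := by
      simp only [PySem.Dict.keys, hitems]
      simp [Function.comp_def]
    have hknd : d.keys.Nodup := by rw [hkeys]; exact hnd
    have hmem : (key x, v x) ∈ d.items := by rw [hitems]; simp
    have hgd : d.getD (key x) 0 = v x := PySem.Dict.getD_of_mem_items d hmem hknd 0
    have hcont : d.contains (key x) = true := by
      rw [PySem.Dict.contains_iff_mem_keys, hkeys]; simp
    have hnotl0 : key x ∉ l₀.map Prod.fst := fun hmem' =>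
      ((List.nodup_append.mp hnd).2.2 (key x) hmem' (key x) (by simp)) rfl
    have hnotxs : key x ∉ xs.map key :=
      (List.nodup_cons.mp (by simpa using (List.nodup_append.mp hnd).2.1)).1
    have hstep : (if c x then d.insert (key x) (g x (d.getD (key x) 0)) else d).items
        = (l₀ ++ [(key x, if c x then g x (v x) else v x)]) ++ xs.map (fun a => (key a, v a)) := by
      by_cases hc : c x
      · simp only [if_pos hc, hgd]
        rw [PySem.Dict.items_insert_of_contains d _ hcont, hitems, List.map_append]
        have hl0 : l₀.map (fun p => if (p.1 == key x) = true then (key x, g x (v x)) else p) = l₀ := by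
          conv_rhs => rw [← List.map_id l₀]
          apply List.map_congr_left
          intro p hp
          have hne : (p.1 == key x) = false := by
            rw [beq_eq_false_iff_ne]
            intro he
            exact hnotl0 (he ▸ List.mem_map_of_mem hp)
          simp [hne]
        have htail : (xs.map (fun a => (key a, v a))).map
            (fun p => if (p.1 == key x) = true then (key x, g x (v x)) else p)
              = xs.map (fun a => (key a, v a)) := by
          rw [List.map_map]
          apply List.map_congr_left
          intro a ha
          have hne' : key a ≠ key x := by
            intro he
            exact hnotxs (he ▸ List.mem_map_of_mem ha)
          simp [hne']
        simp only [List.map_cons, hl0, htail]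
        simp
      · simp only [if_neg hc]
        rw [hitems]
        simp
    have hnd' : ((l₀ ++ [(key x, if c x then g x (v x) else v x)]).map Prod.fst ++ xs.map key).Nodup := by
      simpa using hnd
    have hrec := pvFoldUpdate key v c g xs (l₀ ++ [(key x, if c x then g x (v x) else v x)])
      (if c x then d.insert (key x) (g x (d.getD (key x) 0)) else d) hstep hnd'
    rw [List.foldl_cons]
    by_cases hc : c x
    · simp only [if_pos hc] at hrec ⊢
      rw [hrec]
      simp [hc]
    · simp only [if_neg hc] at hrec ⊢
      rw [hrec]
      simp [hc]

lemma pvFoldUpdate' {α : Type} (key : α → String) (v : α → Int) (g : α → Int → Int)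
    (xs : List α) (d : PySem.Dict String Int)
    (hitems : d.items = xs.map (fun a => (key a, v a)))
    (hnd : (xs.map key).Nodup) :
    (xs.foldl (fun sc a => sc.insert (key a) (g a (sc.getD (key a) 0))) d).items
      = xs.map (fun a => (key a, g a (v a))) := by
  have h := pvFoldUpdate key v (fun _ => True) g xs [] d (by simpa using hitems)
    (by simpa using hnd)
  simpa using h

-- A's distance dict after t seconds, in items form
lemma pvDistA_items (t : Int) (data : List String) (hnd : (data.map pvName).Nodup) :
    (pvDistA t data).items = data.map (fun l => (pvName l, pvClosed t l)) := by
  unfold pvDistA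
  rw [List.foldl_map]
  have hfun : (fun (d : PySem.Dict String Int) (x : String) =>
      d.insert ((PySem.List.pyGet? ((PySem.Str.split? x " ").getD []) 0).getD "")
        ((PySem.Int.ofStr? ((PySem.List.pyGet? ((PySem.Str.split? x " ").getD []) 3).getD "")).getD 0 *
          (((PySem.Int.divmod? t
              ((PySem.Int.ofStr? ((PySem.List.pyGet? ((PySem.Str.split? x " ").getD []) 6).getD "")).getD 0 +
               (PySem.Int.ofStr? ((PySem.List.pyGet? ((PySem.Str.split? x " ").getD []) 13).getD "")).getD 0)).getD (0, 0)).1 *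
             (PySem.Int.ofStr? ((PySem.List.pyGet? ((PySem.Str.split? x " ").getD []) 6).getD "")).getD 0 +
           min ((PySem.Int.divmod? t
              ((PySem.Int.ofStr? ((PySem.List.pyGet? ((PySem.Str.split? x " ").getD []) 6).getD "")).getD 0 +
               (PySem.Int.ofStr? ((PySem.List.pyGet? ((PySem.Str.split? x " ").getD []) 13).getD "")).getD 0)).getD (0, 0)).2
             ((PySem.Int.ofStr? ((PySem.List.pyGet? ((PySem.Str.split? x " ").getD []) 6).getD "")).getD 0))))
        = fun d x => d.insert (pvName x) (pvClosed t x) := by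
    funext d x
    simp only [pvName, pvFields, pvClosed, pvSp, pvDu, pvRe, pvField?, pvGetter]
  rw [hfun, PySem.Dict.items_foldl_insert_fresh data pvName (fun l => pvClosed t l)
    PySem.Dict.empty (by intro a _; simp) hnd]
  rw [show PySem.Dict.empty.items = ([] : List (String × Int)) from rfl]
  simp

-- shape facts for a dict whose items run along data
lemma pvItemsKeys (data : List String) (f : String → Int) (d : PySem.Dict String Int)
    (hit : d.items = data.map (fun l => (pvName l, f l))) :
    d.keys = data.map pvName := by
  simp only [PySem.Dict.keys, hit]
  simp [Function.comp_def]

lemma pvItemsValues (data : List String) (f : String → Int) (d : PySem.Dict String Int)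
    (hit : d.items = data.map (fun l => (pvName l, f l))) :
    d.values = data.map f := by
  simp only [PySem.Dict.values, hit]
  simp [Function.comp_def]

lemma pvItemsGet? (data : List String) (hnd : (data.map pvName).Nodup) (f : String → Int)
    (d : PySem.Dict String Int) (hit : d.items = data.map (fun l => (pvName l, f l)))
    (l : String) (hl : l ∈ data) :
    (d.get? (pvName l)).getD 0 = f l := by
  have hmem : (pvName l, f l) ∈ d.items := by
    rw [hit]; exact List.mem_map_of_mem hl
  have hk : d.keys.Nodup := by rw [pvItemsKeys data f d hit]; exact hnd
  rw [PySem.Dict.get?_of_mem_items d hmem hk]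
  rfl

lemma pvItemsGetD (data : List String) (hnd : (data.map pvName).Nodup) (f : String → Int)
    (d : PySem.Dict String Int) (hit : d.items = data.map (fun l => (pvName l, f l)))
    (l : String) (hl : l ∈ data) :
    d.getD (pvName l) 0 = f l := by
  have hmem : (pvName l, f l) ∈ d.items := by
    rw [hit]; exact List.mem_map_of_mem hl
  have hk : d.keys.Nodup := by rw [pvItemsKeys data f d hit]; exact hnd
  exact PySem.Dict.getD_of_mem_items d hmem hk 0

lemma pvNmLam :
    (fun line => (PySem.List.pyGet? ((PySem.Str.split? line " ").getD []) 0).getD "") = pvName := by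
  funext line
  simp only [pvName, pvFields]

-- the initial all-zero dict built from the names, in items form
lemma pvZeroDict_items (data : List String) (hnd : (data.map pvName).Nodup) :
    ((data.map (fun line => (PySem.List.pyGet? ((PySem.Str.split? line " ").getD []) 0).getD "")).foldl
        (fun d n => d.insert n 0) PySem.Dict.empty).items
      = data.map (fun l => (pvName l, (0 : Int))) := by
  rw [pvNmLam, List.foldl_map,
    PySem.Dict.items_foldl_insert_fresh data pvName (fun _ => (0 : Int))
      PySem.Dict.empty (by intro a _; simp) hnd]
  rw [show PySem.Dict.empty.items = ([] : List (String × Int)) from rfl]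
  simp

-- A's initial scores dict equals B's (same inserts in the same order)
lemma pvScores0_eq (data : List String) :
    PySem.Dict.ofList (data.map (fun line =>
        ((PySem.List.pyGet? ((PySem.Str.split? line " ").getD []) 0).getD "", (0 : Int))))
      = (data.map (fun line => (PySem.List.pyGet? ((PySem.Str.split? line " ").getD []) 0).getD "")).foldl
          (fun d n => d.insert n 0) PySem.Dict.empty := by
  have h : PySem.Dict.ofList (κ := String) (ν := Int)
      = fun l => l.foldl (fun d p => d.insert p.1 p.2) PySem.Dict.empty := rfl
  rw [h]
  simp only [List.foldl_map]

lemma pvParseB_eta (line : String) :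
    pvParseB line = (pvName line, pvSp line, pvDu line, pvRe line) := by
  simp only [pvParseB, pvName, pvFields, pvSp, pvDu, pvRe, pvField?, pvGetter]

-- B's distance update over one second, in items form
lemma pvAdvanceB_items (data : List String) (hnd : (data.map pvName).Nodup)
    (hok : ∀ l ∈ data, pvLineOK l) (n : Nat) (dist : PySem.Dict String Int)
    (hit : dist.items = data.map (fun l => (pvName l, pvClosed (n : Int) l))) :
    (pvAdvanceB ((n : Int) + 1) (data.map pvParseB) dist).items
      = data.map (fun l => (pvName l, pvClosed ((n : Int) + 1) l)) := by
  unfold pvAdvanceB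
  rw [List.foldl_map]
  have hbody : (fun (d : PySem.Dict String Int) (x : String) =>
      if PySem.Int.mod ((n : Int) + 1 - 1) ((pvParseB x).2.2.1 + (pvParseB x).2.2.2) < (pvParseB x).2.2.1
      then d.insert (pvParseB x).1 (d.getD (pvParseB x).1 0 + (pvParseB x).2.1) else d)
        = fun d x =>
          if PySem.Int.mod (n : Int) (pvDu x + pvRe x) < pvDu x
          then d.insert (pvName x) (d.getD (pvName x) 0 + pvSp x) else d := by
    funext d x
    simp [pvParseB_eta]
  rw [hbody]
  rw [pvFoldUpdate pvName (fun l => pvClosed (n : Int) l)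
    (fun x => PySem.Int.mod (n : Int) (pvDu x + pvRe x) < pvDu x)
    (fun x val => val + pvSp x) data [] dist (by simpa using hit) (by simpa using hnd)]
  simp only [List.nil_append]
  apply List.map_congr_left
  intro l hl
  rw [pvClosed_succ l (hok l hl) (n : Int) (by omega)]
  split_ifs <;> ring_nf

-- the A-side loop state after n seconds
lemma pvMainA (data : List String) (hnd : (data.map pvName).Nodup)
    (hok : ∀ l ∈ data, pvLineOK l) (n : Nat) :
    ((PySem.List.pyRange 0 (n : Int) 1).foldl
        (fun scores _time =>
          ((pvDistA (_time + 1) data).keys).foldl (fun sc reindeer =>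
            sc.insert reindeer (sc.getD reindeer 0 +
              (if (PySem.List.max? (pvDistA (_time + 1) data).values (fun v => v)).getD 0
                    == ((pvDistA (_time + 1) data).get? reindeer).getD 0 then 1 else 0))) scores)
        (PySem.Dict.ofList (data.map (fun line =>
          ((PySem.List.pyGet? ((PySem.Str.split? line " ").getD []) 0).getD "", (0 : Int)))))).items
      = data.map (fun l => (pvName l, pvW data n l)) := by
  induction n with
  | zero =>
      rw [show ((0 : Nat) : Int) = 0 by simp, PySem.List.pyRange_one_eq_nil le_rfl,
        List.foldl_nil, pvScores0_eq, pvZeroDict_items data hnd]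
      simp [pvW]
  | succ n ih =>
      rw [show ((n + 1 : Nat) : Int) = ((n : Nat) : Int) + 1 by push_cast; ring,
        PySem.List.pyRange_one_succ_right (by omega)]
      simp only [List.foldl_append, List.foldl_cons, List.foldl_nil]
      rw [pvItemsKeys data (fun l => pvClosed ((n : Int) + 1) l) _
          (pvDistA_items ((n : Int) + 1) data hnd),
        pvItemsValues data (fun l => pvClosed ((n : Int) + 1) l) _
          (pvDistA_items ((n : Int) + 1) data hnd),
        List.foldl_map]
      rw [PySem.List.foldl_congr_mem data _
        (fun sc x => sc.insert (pvName x) (sc.getD (pvName x) 0 +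
          (if (PySem.List.max? (data.map (fun l => pvClosed ((n : Int) + 1) l)) (fun v => v)).getD 0
                == pvClosed ((n : Int) + 1) x then 1 else 0))) _
        (by
          intro acc x hx
          rw [pvItemsGet? data hnd (fun l => pvClosed ((n : Int) + 1) l) _
            (pvDistA_items ((n : Int) + 1) data hnd) x hx])]
      rw [pvFoldUpdate' pvName (pvW data n)
        (fun x val => val +
          (if (PySem.List.max? (data.map (fun l => pvClosed ((n : Int) + 1) l)) (fun v => v)).getD 0
                == pvClosed ((n : Int) + 1) x then 1 else 0)) data _ ih hnd]
      apply List.map_congr_left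
      intro l hl
      simp only [pvW, pvF, beq_iff_eq]
      rfl

-- the B-side loop state after n seconds
lemma pvMainB (data : List String) (hnd : (data.map pvName).Nodup)
    (hok : ∀ l ∈ data, pvLineOK l) (n : Nat) :
    (((PySem.List.pyRange 1 ((n : Int) + 1) 1).foldl
      (fun (st : PySem.Dict String Int × PySem.Dict String Int) t =>
        ((data.map (fun line => (PySem.List.pyGet? ((PySem.Str.split? line " ").getD []) 0).getD "")).foldl
          (fun sc nn =>
            if (pvAdvanceB t (data.map pvParseB) st.2).getD nn 0
                == (PySem.List.max? (pvAdvanceB t (data.map pvParseB) st.2).values (fun v => v)).getD 0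
            then sc.insert nn (sc.getD nn 0 + 1) else sc) st.1,
         pvAdvanceB t (data.map pvParseB) st.2))
      ((data.map (fun line => (PySem.List.pyGet? ((PySem.Str.split? line " ").getD []) 0).getD "")).foldl
          (fun d nn => d.insert nn 0) PySem.Dict.empty,
       (data.map (fun line => (PySem.List.pyGet? ((PySem.Str.split? line " ").getD []) 0).getD "")).foldl
          (fun d nn => d.insert nn 0) PySem.Dict.empty))).1.items
        = data.map (fun l => (pvName l, pvW data n l))
    ∧ (((PySem.List.pyRange 1 ((n : Int) + 1) 1).foldl
      (fun (st : PySem.Dict String Int × PySem.Dict String Int) t =>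
        ((data.map (fun line => (PySem.List.pyGet? ((PySem.Str.split? line " ").getD []) 0).getD "")).foldl
          (fun sc nn =>
            if (pvAdvanceB t (data.map pvParseB) st.2).getD nn 0
                == (PySem.List.max? (pvAdvanceB t (data.map pvParseB) st.2).values (fun v => v)).getD 0
            then sc.insert nn (sc.getD nn 0 + 1) else sc) st.1,
         pvAdvanceB t (data.map pvParseB) st.2))
      ((data.map (fun line => (PySem.List.pyGet? ((PySem.Str.split? line " ").getD []) 0).getD "")).foldl
          (fun d nn => d.insert nn 0) PySem.Dict.empty,
       (data.map (fun line => (PySem.List.pyGet? ((PySem.Str.split? line " ").getD []) 0).getD "")).foldl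
          (fun d nn => d.insert nn 0) PySem.Dict.empty))).2.items
        = data.map (fun l => (pvName l, pvClosed (n : Int) l)) := by
  induction n with
  | zero =>
      rw [show ((0 : Nat) : Int) + 1 = 1 by simp, PySem.List.pyRange_one_eq_nil le_rfl,
        List.foldl_nil]
      refine ⟨by rw [pvZeroDict_items data hnd]; simp [pvW], ?_⟩
      rw [pvZeroDict_items data hnd]
      apply List.map_congr_left
      intro l hl
      rw [show ((0 : Nat) : Int) = 0 by simp, pvClosed_zero l (hok l hl)]
  | succ n ih =>
      obtain ⟨ihS, ihD⟩ := ih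
      rw [show ((n + 1 : Nat) : Int) + 1 = (((n : Nat) : Int) + 1) + 1 by push_cast; ring,
        PySem.List.pyRange_one_succ_right (by omega)]
      simp only [List.foldl_append, List.foldl_cons, List.foldl_nil]
      rw [pvNmLam] at ihS ihD ⊢
      have hadv := pvAdvanceB_items data hnd hok n _ ihD
      constructor
      · rw [List.foldl_map]
        rw [pvItemsValues data (fun l => pvClosed ((n : Int) + 1) l) _ hadv]
        rw [PySem.List.foldl_congr_mem data _
          (fun sc x =>
            if (pvClosed ((n : Int) + 1) x
                  == (PySem.List.max? (data.map (fun l => pvClosed ((n : Int) + 1) l)) (fun v => v)).getD 0) = true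
            then sc.insert (pvName x) (sc.getD (pvName x) 0 + 1) else sc) _
          (by
            intro acc x hx
            rw [pvItemsGetD data hnd (fun l => pvClosed ((n : Int) + 1) l) _ hadv x hx])]
        rw [pvFoldUpdate pvName (pvW data n)
          (fun x => (pvClosed ((n : Int) + 1) x
              == (PySem.List.max? (data.map (fun l => pvClosed ((n : Int) + 1) l)) (fun v => v)).getD 0) = true)
          (fun _ val => val + 1) data [] _ (by simpa using ihS) (by simpa using hnd)]
        simp only [List.nil_append]
        apply List.map_congr_left
        intro l hl
        simp only [pvW, pvF, beq_iff_eq]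
        by_cases h : (PySem.List.max? (data.map (fun l => pvClosed ((n : Int) + 1) l)) (fun v => v)).getD 0
            = pvClosed ((n : Int) + 1) l
        · rw [if_pos h.symm, if_pos h]
        · rw [if_neg (fun he => h he.symm), if_neg h]
          ring
      · exact hadv

-- the verdict
theorem calculate_reindeer_points_after_seconds_py_spec : Claim_equal_calculate_reindeer_points_after_seconds_py := by
  unfold Claim_equal_calculate_reindeer_points_after_seconds_py
  intro seconds data _hdom hpre
  unfold Spec_calculate_reindeer_points_after_seconds_py
  by_cases hs : seconds ≤ 0
  · simp only [calculate_reindeer_points_after_seconds_py,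
      calculate_reindeer_points_after_seconds_py_alt]
    rw [if_pos hs, PySem.List.pyRange_one_eq_nil hs, List.foldl_nil, pvScores0_eq]
  · rcases hpre with h0 | ⟨_hne, hnd, hok⟩
    · omega
    have hsec : seconds = ((seconds.toNat : Nat) : Int) := (Int.toNat_of_nonneg (by omega)).symm
    simp only [calculate_reindeer_points_after_seconds_py,
      calculate_reindeer_points_after_seconds_py_alt]
    rw [if_neg hs]
    rw [hsec]
    rw [pvMainA data hnd hok seconds.toNat, (pvMainB data hnd hok seconds.toNat).1]
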